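-- pv_equiv track=rewrite | github.com/Benneee/Take-Python-Serious | 10-Lists-Iteration/sum-of-values-and-indices.py | sum_of_values_indices
-- ===== SOURCE A (Python) =====
-- def sum_of_values_indices(values):
--     if len(values) == 0:
--         return 0
--     values_sum = 0
--     indices_sum = 0
--     total = 0;
--     for index, value in enumerate(values):
--         indices_sum += index
--         values_sum += value
--         total = indices_sum + values_sum
--
--     return total;
-- ===== SOURCE B (Python) =====
-- def sum_of_values_indices(values):
--     n = len(values)
--     return sum(values) + n * (n - 1) // 2
-- ===== Notes on version B (the rewrite author's own statement) =====
-- stated objective: simpler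
-- what changed: Replaces the running-accumulator loop over enumerate with builtin sum(values) plus the closed-form index total n*(n-1)//2.
import Mathlib
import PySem

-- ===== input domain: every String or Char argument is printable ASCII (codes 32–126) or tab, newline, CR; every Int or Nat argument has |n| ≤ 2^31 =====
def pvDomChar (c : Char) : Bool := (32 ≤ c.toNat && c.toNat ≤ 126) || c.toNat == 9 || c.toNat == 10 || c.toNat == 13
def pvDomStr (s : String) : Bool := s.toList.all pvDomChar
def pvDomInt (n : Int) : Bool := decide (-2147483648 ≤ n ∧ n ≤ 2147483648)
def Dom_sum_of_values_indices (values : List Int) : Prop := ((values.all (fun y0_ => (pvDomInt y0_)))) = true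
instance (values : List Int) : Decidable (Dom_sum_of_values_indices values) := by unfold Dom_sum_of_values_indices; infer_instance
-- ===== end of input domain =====

-- ===== PORT A =====
-- B: builtin sum plus closed-form index total n*(n-1)//2 instead of the accumulator loop (simpler).
def sum_of_values_indices (values : List Int) : Int :=
  if values.length == 0 then 0
  else
    let st := (PySem.List.enumerate values).foldl
      (fun (s : Int × Int × Int) (p : Int × Int) =>
        let indices_sum := s.1 + p.1
        let values_sum := s.2.1 + p.2
        (indices_sum, values_sum, indices_sum + values_sum)) (0, 0, 0)
    st.2.2

-- ===== PORT B =====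
def sum_of_values_indices_alt (values : List Int) : Int :=
  let n : Int := values.length
  values.sum + PySem.Int.floordiv (n * (n - 1)) 2

-- ===== PRECONDITION & SPEC =====
def Spec_sum_of_values_indices (values : List Int) (out : Int) : Prop := out = sum_of_values_indices_alt values
instance (values : List Int) (out : Int) : Decidable (Spec_sum_of_values_indices values out) := by unfold Spec_sum_of_values_indices; infer_instance

-- ===== CLAIM (what is proved, stated in full; the proofs are below) =====
def Claim_equal_sum_of_values_indices : Prop := ∀ (values : List Int), Dom_sum_of_values_indices values → Spec_sum_of_values_indices values (sum_of_values_indices values)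

-- ===== LEMMAS AND PROOFS =====

-- ===== VERDICT (by name: the statement is the Claim_ definition above) =====
-- fold invariant: after a nonempty run of steps, the third component is the
-- sum of the first two, which themselves accumulate the firsts and seconds.
theorem pv_fold_total (l : List (Int × Int)) (a b c : Int) (h : l ≠ []) :
    (l.foldl (fun (s : Int × Int × Int) (p : Int × Int) =>
        let indices_sum := s.1 + p.1
        let values_sum := s.2.1 + p.2
        (indices_sum, values_sum, indices_sum + values_sum)) (a, b, c)).2.2
      = (a + (l.map (·.1)).sum) + (b + (l.map (·.2)).sum) := by
  induction l generalizing a b c with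
  | nil => exact absurd rfl h
  | cons p l ih =>
    cases l with
    | nil => simp
    | cons q l =>
      rw [List.foldl_cons, ih _ _ _ (by simp)]
      simp; ring

theorem pv_range_sum (n : Nat) :
    ((PySem.List.pyRange 0 n 1).sum : Int) = PySem.Int.floordiv ((n : Int) * ((n : Int) - 1)) 2 := by
  induction n with
  | zero => decide
  | succ m ih =>
    have hcast : ((m + 1 : Nat) : Int) = (m : Int) + 1 := by push_cast; ring
    rw [hcast, PySem.List.pyRange_one_append 0 (m : Int) ((m : Int) + 1) (by omega) (by omega)]
    rw [PySem.List.pyRange_one_cons (a := (m : Int)) (b := (m : Int) + 1) (by omega),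
        PySem.List.pyRange_one_eq_nil (a := (m : Int) + 1) (b := (m : Int) + 1) (by omega)]
    simp only [List.sum_append, List.sum_cons, List.sum_nil, ih]
    have h2 : (0:Int) < 2 := by decide
    simp only [PySem.Int.floordiv_eq_ediv_of_pos h2]
    have hm : ((m : Int) + 1) * ((m : Int) + 1 - 1) = (m : Int) * ((m : Int) - 1) + 2 * m := by ring
    rw [hm]
    omega

theorem sum_of_values_indices_spec : Claim_equal_sum_of_values_indices := by
  intro values _
  unfold Spec_sum_of_values_indices sum_of_values_indices sum_of_values_indices_alt
  by_cases h : values = []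
  · subst h; decide
  · have hne : PySem.List.enumerate values 0 ≠ [] := by
      cases values with
      | nil => exact absurd rfl h
      | cons x xs => simp [PySem.List.enumerate_cons]
    simp only [beq_iff_eq, List.length_eq_zero_iff, h, if_false]
    rw [pv_fold_total _ _ _ _ hne]
    rw [PySem.List.map_fst_enumerate, PySem.List.map_snd_enumerate]
    simp only [zero_add]
    rw [pv_range_sum]
    ring
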